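-- pv_equiv track=rewrite | github.com/mustanska/Console-Connect-Four | functions.py | player_move
-- ===== SOURCE A (Python) =====
-- def player_move(field, sign, column):
--     row = len(field) - 1
--
--     while row >= 0:
--         if field[row][column] == 0:
--             field[row][column] = sign
--             break
--         else:
--             row -= 1
--
--     return field
-- ===== SOURCE B (Python) =====
-- def player_move(field, sign, column):
--     # Gather all empty row indices in the column, then drop the token in the
--     # bottom-most one (mutates field in place, like the original).
--     empties = [r for r in range(len(field)) if field[r][column] == 0]
--     if empties:
--         field[empties[-1]][column] = sign
--     return field
-- ===== Notes on version B (the rewrite author's own statement) =====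
-- stated objective: simpler
-- what changed: Replaces the bottom-up while-loop scan with break by a single gather of all empty row indices followed by writing at the last (bottom-most) one.
-- outside the precondition, e.g. on player_move([[5], [0, 0]], 1, 1): A returns [[5], [0, 1]], B raises IndexError
import Mathlib
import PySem

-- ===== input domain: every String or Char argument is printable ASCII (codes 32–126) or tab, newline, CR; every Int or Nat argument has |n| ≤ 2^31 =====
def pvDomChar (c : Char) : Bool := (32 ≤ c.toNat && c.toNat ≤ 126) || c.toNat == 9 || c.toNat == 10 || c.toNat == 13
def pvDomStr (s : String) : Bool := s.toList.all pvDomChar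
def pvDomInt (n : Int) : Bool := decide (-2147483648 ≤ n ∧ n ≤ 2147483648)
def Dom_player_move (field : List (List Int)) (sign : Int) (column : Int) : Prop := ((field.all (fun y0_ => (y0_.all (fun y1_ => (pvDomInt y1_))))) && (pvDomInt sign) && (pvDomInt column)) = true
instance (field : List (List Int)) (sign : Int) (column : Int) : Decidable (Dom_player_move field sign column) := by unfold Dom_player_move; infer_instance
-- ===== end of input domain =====

-- B replaces A's bottom-up scan-with-break by gathering all empty row indices and
-- writing at the last one (objective: simpler). Both Pythons mutate `field` in place
-- identically on inputs in Pre_; the equivalence proved is about the return value.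

-- ===== PORT A =====
-- A's while loop counting row down from len(field)-1; the Nat argument is row+1.
def player_move_go (field : List (List Int)) (sign : Int) (column : Int) : Nat → List (List Int)
  | 0 => field
  | r + 1 =>
    if PySem.List.pyGetD (field.getD r []) column 0 = 0 then
      field.set r (PySem.List.pySetD (field.getD r []) column sign)
    else
      player_move_go field sign column r

def player_move (field : List (List Int)) (sign : Int) (column : Int) : List (List Int) :=
  player_move_go field sign column field.length

-- ===== PORT B =====
def player_move_alt (field : List (List Int)) (sign : Int) (column : Int) : List (List Int) :=
  let empties := (List.range field.length).filter
      (fun r => decide (PySem.List.pyGetD (field.getD r []) column 0 = 0))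
  match empties.getLast? with
  | some r => field.set r (PySem.List.pySetD (field.getD r []) column sign)
  | none => field

-- ===== PRECONDITION & SPEC =====
-- Pre_ excludes inputs where `column` is out of range for some row: there Python A
-- raises IndexError unless it breaks first, and B (which reads every row) raises;
-- on the inputs of this shape where A still returns (ragged boards, see cites) B raises.
def Pre_player_move (field : List (List Int)) (_sign : Int) (column : Int) : Prop :=
  ∀ row ∈ field, PySem.Raise.InRange row.length column
instance (field : List (List Int)) (sign : Int) (column : Int) : Decidable (Pre_player_move field sign column) := by unfold Pre_player_move; infer_instance

def pvWitness_player_move : List (List Int) × Int × Int := ([[0, 0], [0, 1]], 1, 0)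

def Spec_player_move (field : List (List Int)) (sign : Int) (column : Int) (out : List (List Int)) : Prop := out = player_move_alt field sign column
instance (field : List (List Int)) (sign : Int) (column : Int) (out : List (List Int)) : Decidable (Spec_player_move field sign column out) := by unfold Spec_player_move; infer_instance

-- ===== CLAIM (what is proved, stated in full; the proofs are below) =====
def Claim_equal_player_move : Prop := ∀ (field : List (List Int)) (sign : Int) (column : Int), Dom_player_move field sign column → Pre_player_move field sign column → Spec_player_move field sign column (player_move field sign column)

-- ===== LEMMAS AND PROOFS =====
-- A's countdown loop run from row k-1 equals B's gather-then-last over range k.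
theorem player_move_go_eq (field : List (List Int)) (sign : Int) (column : Int) :
    ∀ k : Nat,
      player_move_go field sign column k =
        match ((List.range k).filter
            (fun r => decide (PySem.List.pyGetD (field.getD r []) column 0 = 0))).getLast? with
        | some r => field.set r (PySem.List.pySetD (field.getD r []) column sign)
        | none => field := by
  intro k
  induction k with
  | zero => simp [player_move_go]
  | succ k ih =>
    rw [player_move_go, List.range_succ, List.filter_append]
    simp only [List.getD_eq_getElem?_getD]
    split_ifs with h
    · simp [h]
    · simp [h, ih]

-- ===== VERDICT (by name: the statement is the Claim_ definition above) =====
theorem player_move_spec : Claim_equal_player_move := by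
  intro field sign column _ _
  unfold Spec_player_move player_move player_move_alt
  exact player_move_go_eq field sign column field.length
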